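-- pv_equiv track=rewrite | github.com/Universemul/AdventOfCode2020 | day11/main.py | compute_new_line
-- ===== SOURCE A (Python) =====
-- def compute_diff(s1, s2):
--     return sum(1 for a, b in zip(s1, s2) if a != b)
--
-- def compute_new_line(row, diff, threshold, i, max_col):
--     line = []
--     for j in range(max_col):
--         t = diff[(i, j)]
--         if row[j] == 'L' and t == 0:
--             line.append('#')
--         elif row[j] == '#' and t >= threshold:
--             line.append('L')
--         else:
--             line.append(row[j])
--     return line, compute_diff(line, row)
-- ===== SOURCE B (Python) =====
-- def compute_new_line(row, diff, threshold, i, max_col):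
--     line = []
--     changes = 0
--     for j in range(max_col):
--         t = diff[(i, j)]
--         c = row[j]
--         if c == 'L' and t == 0:
--             line.append('#')
--             changes += 1
--         elif c == '#' and t >= threshold:
--             line.append('L')
--             changes += 1
--         else:
--             line.append(c)
--     return line, changes
-- ===== Notes on version B (the rewrite author's own statement) =====
-- stated objective: simpler
-- what changed: B builds the new line and counts the changed cells in one pass (incrementing only in the two transform branches), dropping compute_diff's second zip-traversal entirely.
import Mathlib
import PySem

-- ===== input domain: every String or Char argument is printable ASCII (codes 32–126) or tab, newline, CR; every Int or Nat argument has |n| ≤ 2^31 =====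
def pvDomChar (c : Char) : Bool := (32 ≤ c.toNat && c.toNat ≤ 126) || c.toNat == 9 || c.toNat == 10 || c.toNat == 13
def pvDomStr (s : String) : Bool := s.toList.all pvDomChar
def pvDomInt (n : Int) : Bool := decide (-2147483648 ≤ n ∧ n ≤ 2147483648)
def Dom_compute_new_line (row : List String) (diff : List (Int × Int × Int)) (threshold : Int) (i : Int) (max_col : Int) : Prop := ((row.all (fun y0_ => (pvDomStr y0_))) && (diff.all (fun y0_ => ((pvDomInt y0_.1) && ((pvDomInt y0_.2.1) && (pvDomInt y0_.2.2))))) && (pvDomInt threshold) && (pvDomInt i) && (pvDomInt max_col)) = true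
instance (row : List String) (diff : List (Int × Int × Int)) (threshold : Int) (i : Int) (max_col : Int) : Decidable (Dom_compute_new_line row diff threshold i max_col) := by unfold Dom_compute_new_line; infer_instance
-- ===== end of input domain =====

-- B fuses the change count into the single line-building pass (counting in the two transform
-- branches) instead of A's second zip-traversal compute_diff(line, row); objective: simpler.

-- ===== PORT A =====
-- compute_diff(s1, s2) = sum(1 for a, b in zip(s1, s2) if a != b)
def compute_diff (s1 s2 : List String) : Int :=
  (s1.zip s2).foldl (fun acc p => if p.1 ≠ p.2 then acc + 1 else acc) 0

def compute_new_line (row : List String) (diff : List (Int × Int × Int)) (threshold : Int) (i : Int) (max_col : Int) : List String × Int :=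
  let line := (PySem.List.pyRange 0 max_col 1).foldl (fun line j =>
    -- t = diff[(i, j)]  (KeyError → none; default 0 unreachable under Pre_)
    let t := match diff.find? (fun p => p.1 == i && p.2.1 == j) with
      | some p => p.2.2
      | none => 0
    -- row[j]  (IndexError excluded by Pre_)
    let c := (PySem.List.pyGet? row j).getD ""
    if c = "L" ∧ t = 0 then line ++ ["#"]
    else if c = "#" ∧ t ≥ threshold then line ++ ["L"]
    else line ++ [c]) []
  (line, compute_diff line row)

-- ===== PORT B =====
-- single pass: builds the new line and the change counter together (Source B's loop, as structural
-- recursion on the remaining iteration count, j the current index)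
def altGo (row : List String) (diff : List (Int × Int × Int)) (threshold i : Int) : Nat → Int → List String × Int
  | 0, _ => ([], 0)
  | n+1, j =>
    let t := match diff.find? (fun p => p.1 == i && p.2.1 == j) with
      | some p => p.2.2
      | none => 0
    let c := (PySem.List.pyGet? row j).getD ""
    let r := altGo row diff threshold i n (j+1)
    if c = "L" ∧ t = 0 then ("#" :: r.1, r.2 + 1)
    else if c = "#" ∧ t ≥ threshold then ("L" :: r.1, r.2 + 1)
    else (c :: r.1, r.2)

def compute_new_line_alt (row : List String) (diff : List (Int × Int × Int)) (threshold : Int) (i : Int) (max_col : Int) : List String × Int :=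
  altGo row diff threshold i max_col.toNat 0

-- ===== PRECONDITION & SPEC =====
-- Pre_ excludes exactly the inputs where Python A raises: an IndexError when max_col exceeds
-- len(row), and a KeyError when some looked-up key (i, j) is missing from diff.
def Pre_compute_new_line (row : List String) (diff : List (Int × Int × Int)) (threshold : Int) (i : Int) (max_col : Int) : Prop :=
  max_col ≤ (row.length : Int) ∧
  ((List.range max_col.toNat).all (fun j => diff.any (fun p => p.1 == i && p.2.1 == (j : Int))) = true)
instance (row : List String) (diff : List (Int × Int × Int)) (threshold : Int) (i : Int) (max_col : Int) : Decidable (Pre_compute_new_line row diff threshold i max_col) := by unfold Pre_compute_new_line; infer_instance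

def pvWitness_compute_new_line : List String × (List (Int × Int × Int)) × Int × Int × Int :=
  (["L", "#", "."], [(0, 0, 0), (0, 1, 5), (0, 2, 1)], 4, 0, 3)

def Spec_compute_new_line (row : List String) (diff : List (Int × Int × Int)) (threshold : Int) (i : Int) (max_col : Int) (out : List String × Int) : Prop := out = compute_new_line_alt row diff threshold i max_col
instance (row : List String) (diff : List (Int × Int × Int)) (threshold : Int) (i : Int) (max_col : Int) (out : List String × Int) : Decidable (Spec_compute_new_line row diff threshold i max_col out) := by unfold Spec_compute_new_line; infer_instance

-- ===== CLAIM (what is proved, stated in full; the proofs are below) =====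
def Claim_equal_compute_new_line : Prop := ∀ (row : List String) (diff : List (Int × Int × Int)) (threshold : Int) (i : Int) (max_col : Int), Dom_compute_new_line row diff threshold i max_col → Pre_compute_new_line row diff threshold i max_col → Spec_compute_new_line row diff threshold i max_col (compute_new_line row diff threshold i max_col)

-- ===== LEMMAS AND PROOFS =====

-- shifting the accumulator of compute_diff's fold
theorem cnt_shift (l : List (String × String)) (b : Int) :
    l.foldl (fun acc p => if p.1 ≠ p.2 then acc + 1 else acc) b
    = b + l.foldl (fun acc p => if p.1 ≠ p.2 then acc + 1 else acc) 0 := by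
  induction l generalizing b with
  | nil => simp
  | cons x xs ih =>
    simp only [List.foldl_cons]
    by_cases h : x.1 ≠ x.2
    · rw [if_pos h, if_pos h, ih (b + 1), ih (0 + 1)]; omega
    · rw [if_neg h, if_neg h]; exact ih b

theorem cd_cons (a b : String) (s1 s2 : List String) :
    compute_diff (a :: s1) (b :: s2) = (if a ≠ b then 1 else 0) + compute_diff s1 s2 := by
  unfold compute_diff
  simp only [List.zip_cons_cons, List.foldl_cons]
  by_cases h : a ≠ b
  · rw [if_pos h, if_pos h, cnt_shift _ (0 + 1)]; omega
  · rw [if_neg h, if_neg h]; exact cnt_shift _ 0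

-- A's line-building fold equals B's first component
theorem line_eq (row : List String) (diff : List (Int × Int × Int)) (threshold i : Int)
    (n : Nat) :
    ∀ (j : Int) (acc : List String),
    (PySem.List.pyRange j (j + n) 1).foldl (fun line j =>
      let t := match diff.find? (fun p => p.1 == i && p.2.1 == j) with
        | some p => p.2.2
        | none => 0
      let c := (PySem.List.pyGet? row j).getD ""
      if c = "L" ∧ t = 0 then line ++ ["#"]
      else if c = "#" ∧ t ≥ threshold then line ++ ["L"]
      else line ++ [c]) acc
    = acc ++ (altGo row diff threshold i n j).1 := by
  induction n with
  | zero =>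
    intro j acc
    rw [PySem.List.pyRange_one_eq_nil (by omega : j + ((0:Nat) : Int) ≤ j)]
    simp [altGo]
  | succ n ih =>
    intro j acc
    rw [PySem.List.pyRange_one_cons (by push_cast; omega : j < j + ((n+1 : Nat) : Int))]
    have h2 : j + ((n+1 : Nat) : Int) = (j+1) + (n : Int) := by push_cast; omega
    rw [h2]
    simp only [List.foldl_cons]
    rw [ih (j+1)]
    simp only [altGo]
    split_ifs <;> simp

-- B's counter equals compute_diff of B's line against the rest of row
theorem count_eq (row : List String) (diff : List (Int × Int × Int)) (threshold i : Int) :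
    ∀ (n j : Nat), j + n ≤ row.length →
    compute_diff ((altGo row diff threshold i n (j : Int)).1) (row.drop j)
    = (altGo row diff threshold i n (j : Int)).2 := by
  intro n
  induction n with
  | zero => intro j _; simp [altGo, compute_diff]
  | succ n ih =>
    intro j hj
    have hjl : j < row.length := by omega
    have hdrop : row.drop j = row[j] :: row.drop (j+1) := List.drop_eq_getElem_cons hjl
    have hget : (PySem.List.pyGet? row (j : Int)).getD "" = row[j] := by
      rw [PySem.List.pyGet?_natCast]; simp [List.getElem?_eq_getElem hjl]
    have hcast : ((j : Int) + 1) = ((j + 1 : Nat) : Int) := by push_cast; ring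
    have ih' := ih (j+1) (by omega)
    simp only [altGo, hget, hdrop, hcast]
    split_ifs with h1 h2
    · simp only [cd_cons]
      rw [ih']
      have : row[j] = "L" := h1.1
      rw [this]; simp; omega
    · simp only [cd_cons]
      rw [ih']
      have : row[j] = "#" := h2.1
      rw [this]; simp; omega
    · simp only [cd_cons]
      rw [ih']
      simp

-- ===== VERDICT (by name: the statement is the Claim_ definition above) =====
theorem compute_new_line_spec : Claim_equal_compute_new_line := by
  intro row diff threshold i max_col _ hpre
  unfold Spec_compute_new_line compute_new_line compute_new_line_alt
  have hmc : (0 : Int) + (max_col.toNat : Int) = max max_col 0 := by omega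
  by_cases h : max_col ≤ 0
  · have ht : max_col.toNat = 0 := by omega
    rw [PySem.List.pyRange_one_eq_nil h, ht]
    simp [altGo, compute_diff]
  · have ht : (0 : Int) + (max_col.toNat : Int) = max_col := by omega
    have hline := line_eq row diff threshold i max_col.toNat 0 []
    rw [ht] at hline
    have hcnt := count_eq row diff threshold i max_col.toNat 0 (by
      have := hpre.1; omega)
    simp only [Nat.cast_zero] at hcnt
    simp only [List.drop_zero] at hcnt
    simp only [hline, List.nil_append, hcnt]
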